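-- pv_equiv track=rewrite | github.com/Haris0059/fop | labs/err/task_12.py | sumTupleElements
-- ===== SOURCE A (Python) =====
-- def sumTupleElements(lista):
--     if len(lista) == 0:
--         empty = 'List is empty'
--         raise ValueError(empty)
--     l = []
--     for tup in lista:
--         suma = 0
--         for i in tup:
--             if type(i) is not int:
--                 non_numeric = 'Non-numeric values found in tuple'
--                 raise ValueError(non_numeric)
--             suma += i
--         l.append(suma)
--     return l
-- ===== SOURCE B (Python) =====
-- def sumTupleElements(lista):
--     if len(lista) == 0:
--         raise ValueError('List is empty')
--     if any(type(i) is not int for tup in lista for i in tup):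
--         raise ValueError('Non-numeric values found in tuple')
--     # global prefix sums over the flattened element stream
--     pref = [0]
--     for tup in lista:
--         for i in tup:
--             pref.append(pref[-1] + i)
--     # boundary offsets of each tuple inside the flattened stream
--     bounds = [0]
--     for tup in lista:
--         bounds.append(bounds[-1] + len(tup))
--     # each tuple's sum is a difference of two global prefix sums
--     return [pref[bounds[k + 1]] - pref[bounds[k]] for k in range(len(lista))]
-- ===== Notes on version B (the rewrite author's own statement) =====
-- stated objective: alternative
-- what changed: Instead of A's per-tuple accumulator loop, B builds one global prefix-sum array over the flattened element stream plus a boundary-offset array, and recovers each tuple's sum as the difference of two prefix sums.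
import Mathlib
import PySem

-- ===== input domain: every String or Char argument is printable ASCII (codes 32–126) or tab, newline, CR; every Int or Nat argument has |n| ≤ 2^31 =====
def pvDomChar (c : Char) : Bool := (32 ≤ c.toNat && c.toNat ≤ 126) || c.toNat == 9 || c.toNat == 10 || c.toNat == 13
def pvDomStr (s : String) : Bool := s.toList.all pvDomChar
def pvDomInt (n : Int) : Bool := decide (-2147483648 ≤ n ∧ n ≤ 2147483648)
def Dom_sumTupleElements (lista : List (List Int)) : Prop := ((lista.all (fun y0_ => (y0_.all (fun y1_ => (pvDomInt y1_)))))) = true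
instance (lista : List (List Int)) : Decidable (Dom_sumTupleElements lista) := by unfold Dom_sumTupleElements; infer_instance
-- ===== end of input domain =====

-- B replaces A's per-tuple accumulator with global prefix sums over the flattened stream,
-- recovering each tuple's sum as a difference of prefix sums (objective: alternative).

-- ===== PORT A =====
-- A: one loop over the tuples, appending the inner accumulator of each tuple.
def sumTupleElements (lista : List (List Int)) : List Int :=
  lista.foldl (fun l tup => l ++ [tup.foldl (fun suma i => suma + i) 0]) []

-- ===== PORT B =====
-- B: pref = global prefix sums over the flattened elements, bounds = boundary offsets;
-- answer k = pref[bounds[k+1]] - pref[bounds[k]].  The `any(type(i) is not int …)`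
-- validation pass is vacuous on List Int.  pref[-1]/bounds[-1] via pyGetD is exact:
-- both lists start as [0] and only grow, and all indices below are in range.
def sumTupleElements_alt (lista : List (List Int)) : List Int :=
  let pref := lista.foldl
    (fun p tup => tup.foldl (fun p i => p ++ [PySem.List.pyGetD p (-1) 0 + i]) p) [0]
  let bounds := lista.foldl
    (fun b tup => b ++ [PySem.List.pyGetD b (-1) 0 + (tup.length : Int)]) [0]
  (PySem.List.pyRange 0 (lista.length : Int) 1).map (fun k =>
    PySem.List.pyGetD pref (PySem.List.pyGetD bounds (k + 1) 0) 0
      - PySem.List.pyGetD pref (PySem.List.pyGetD bounds k 0) 0)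

-- ===== PRECONDITION & SPEC =====
-- Pre_ excludes only the empty list, on which A raises ValueError('List is empty') (B raises it too).
def Pre_sumTupleElements (lista : List (List Int)) : Prop := lista ≠ []
instance (lista : List (List Int)) : Decidable (Pre_sumTupleElements lista) := by unfold Pre_sumTupleElements; infer_instance
def pvWitness_sumTupleElements : List (List Int) := [[1, 2], []]
def Spec_sumTupleElements (lista : List (List Int)) (out : List Int) : Prop := out = sumTupleElements_alt lista
instance (lista : List (List Int)) (out : List Int) : Decidable (Spec_sumTupleElements lista out) := by unfold Spec_sumTupleElements; infer_instance

-- ===== CLAIM (what is proved, stated in full; the proofs are below) =====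
def Claim_equal_sumTupleElements : Prop := ∀ (lista : List (List Int)), Dom_sumTupleElements lista → Pre_sumTupleElements lista → Spec_sumTupleElements lista (sumTupleElements lista)

-- ===== LEMMAS AND PROOFS =====

-- cum f l a = the list of running totals a, a+f x1, a+f x1+f x2, …
def pvCum {α : Type} (f : α → Int) : List α → Int → List Int
  | [], a => [a]
  | x :: xs, a => a :: pvCum f xs (a + f x)

theorem pvCum_foldl {α : Type} (f : α → Int) (l : List α) (q : List Int) (a : Int) :
    l.foldl (fun b x => b ++ [PySem.List.pyGetD b (-1) 0 + f x]) (q ++ [a]) = q ++ pvCum f l a := by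
  induction l generalizing q a with
  | nil => simp [pvCum]
  | cons x xs ih =>
    simp only [List.foldl_cons, PySem.List.pyGetD_neg_one_append_singleton, pvCum]
    rw [ih (q ++ [a]) (a + f x)]
    simp

theorem pvCum_getD {α : Type} (f : α → Int) (l : List α) (a : Int) (k : Nat) (hk : k ≤ l.length) :
    (pvCum f l a).getD k 0 = a + ((l.take k).map f).sum := by
  induction l generalizing a k with
  | nil =>
    have : k = 0 := by simpa using hk
    subst this; simp [pvCum]
  | cons x xs ih =>
    cases k with
    | zero => simp [pvCum]
    | succ k =>
      simp only [pvCum, List.getD_cons_succ, List.take_succ_cons, List.map_cons, List.sum_cons]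
      rw [ih (a + f x) k (by simpa using hk)]
      ring

theorem pvFlatten_take (lista : List (List Int)) (k : Nat) :
    lista.flatten.take (((lista.take k).map List.length).sum) = (lista.take k).flatten := by
  induction lista generalizing k with
  | nil => simp
  | cons t r ih =>
    cases k with
    | zero => simp
    | succ k =>
      simp only [List.take_succ_cons, List.map_cons, List.sum_cons, List.flatten_cons]
      rw [List.take_append, List.take_of_length_le (Nat.le_add_right _ _),
        Nat.add_sub_cancel_left, ih]

theorem sumA_eq_map (lista : List (List Int)) :
    sumTupleElements lista = lista.map (fun t => t.sum) := by
  unfold sumTupleElements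
  rw [PySem.List.foldl_append_singleton_eq_map]
  refine List.map_congr_left fun t _ => ?_
  rw [← List.sum_eq_foldl]

theorem pvBnd_cast (lista : List (List Int)) (k : Nat) :
    ((lista.take k).map (fun t => (t.length : Int))).sum
      = ((((lista.take k).map List.length).sum : Nat) : Int) := by
  push_cast [List.map_map]
  rfl

theorem pvN_le (lista : List (List Int)) (k : Nat) :
    ((lista.take k).map List.length).sum ≤ lista.flatten.length := by
  rw [List.length_flatten, List.map_take]
  conv_rhs => rw [← List.take_append_drop k (lista.map List.length)]
  rw [List.sum_append]
  omega

theorem pref_at (lista : List (List Int)) (k : Nat) :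
    (pvCum id lista.flatten 0).getD (((lista.take k).map List.length).sum) 0
      = (lista.take k).flatten.sum := by
  rw [pvCum_getD id _ 0 _ (pvN_le lista k), pvFlatten_take]
  simp

theorem pvTakeSucc_flatten_sub {lista : List (List Int)} {k : Nat} (hk1 : k < lista.length) :
    (lista.take (k + 1)).flatten.sum - (lista.take k).flatten.sum = lista[k].sum := by
  have h : List.take (k + 1) lista = List.take k lista ++ [lista[k]] := by
    rw [List.take_add_one, List.getElem?_eq_getElem hk1]
    rfl
  rw [h, List.flatten_append, List.sum_append]
  simp

-- ===== VERDICT (by name: the statement is the Claim_ definition above) =====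
theorem sumTupleElements_spec : Claim_equal_sumTupleElements := by
  intro lista _ _
  unfold Spec_sumTupleElements sumTupleElements_alt
  rw [sumA_eq_map]
  have hpref : lista.foldl
      (fun p tup => tup.foldl (fun p i => p ++ [PySem.List.pyGetD p (-1) 0 + i]) p) [0]
      = pvCum id lista.flatten 0 := by
    rw [← List.foldl_flatten]
    simpa using pvCum_foldl id lista.flatten [] 0
  have hbnd : lista.foldl
      (fun b tup => b ++ [PySem.List.pyGetD b (-1) 0 + (tup.length : Int)]) [0]
      = pvCum (fun t => (t.length : Int)) lista 0 := by
    simpa using pvCum_foldl (fun t : List Int => (t.length : Int)) lista [] 0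
  simp only [hpref, hbnd]
  rw [PySem.List.pyRange_one]
  simp only [Int.sub_zero, Int.toNat_natCast, List.map_map]
  refine List.ext_getElem (by simp) fun k hk1 hk2 => ?_
  simp only [List.length_map] at hk1
  simp only [List.getElem_map, List.getElem_range, Function.comp_apply]
  have hB : ∀ (j : Nat), j ≤ lista.length →
      PySem.List.pyGetD (pvCum (fun t : List Int => (t.length : Int)) lista 0) ((j : Nat) : Int) 0
        = ((((lista.take j).map List.length).sum : Nat) : Int) := by
    intro j hj
    rw [PySem.List.pyGetD_natCast]
    rw [pvCum_getD (fun t : List Int => (t.length : Int)) lista 0 j hj]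
    rw [pvBnd_cast]
    ring
  have h1 : (0 : Int) + (k : Int) + 1 = (((k + 1 : Nat)) : Int) := by push_cast; ring
  have h0 : (0 : Int) + (k : Int) = ((k : Nat) : Int) := by ring
  rw [h1, h0, hB k (le_of_lt hk1), hB (k + 1) hk1]
  rw [PySem.List.pyGetD_natCast, PySem.List.pyGetD_natCast]
  rw [pref_at lista k, pref_at lista (k + 1)]
  rw [pvTakeSucc_flatten_sub hk1]
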